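-- pv_equiv track=rewrite | github.com/pypi-data/pypi-mirror-399 | packages/mcap-data-loader/mcap_data_loader-0.1.0-py3-none-any.whl/mcap_data_loader/utils/extra_itertools.py | take_skip
-- ===== SOURCE A (Python) =====
-- from typing import Any, Iterable, Optional, TypeVar, Generic, Tuple, List, Union
--
-- T = TypeVar("T")
--
-- def take_skip(
--     lst: Iterable[T], N: int, M: int, in_order: bool = False
-- ) -> Tuple[List[T], List[T]]:
--     """Take N elements, skip M elements, repeat until the list is exhausted.
--     Args:
--         lst: The input iterable.
--         N: Number of elements to take.
--         M: Number of elements to skip.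
--         in_order: Whether to take and skip elements in order or round-robin.
--             If in_order is True, the elements are taken and skipped in the original order (slower).
--             If in_order is False, the elements are taken and skipped in a round-robin fashion.
--     Returns:
--         Two lists: taken elements and skipped elements.
--     """
--     if N <= 0 or M < 0:
--         raise ValueError("N must be positive and M must be non-negative.")
--     taken = []
--     skipped = []
--     if in_order:
--         index = 0
--         length = len(lst)
--         while index < length:
--             taken.extend(lst[index : index + N])
--             index += N
--             skipped.extend(lst[index : index + M])
--             index += M
--     else:
--         for i in range(N):
--             taken.extend(lst[i :: N + M])
--         for j in range(M):
--             skipped.extend(lst[N + j :: N + M])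
--     return taken, skipped
-- ===== SOURCE B (Python) =====
-- def take_skip(lst, N, M, in_order=False):
--     if N <= 0 or M < 0:
--         raise ValueError("N must be positive and M must be non-negative.")
--     K = N + M
--     if in_order:
--         taken, skipped = [], []
--         r = 0
--         for x in lst:
--             if r < N:
--                 taken.append(x)
--             else:
--                 skipped.append(x)
--             r = (r + 1) % K
--         return taken, skipped
--     buckets = [[] for _ in range(K)]
--     r = 0
--     for x in lst:
--         buckets[r].append(x)
--         r = (r + 1) % K
--     taken = [x for b in buckets[:N] for x in b]
--     skipped = [x for b in buckets[N:] for x in b]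
--     return taken, skipped
-- ===== Notes on version B (the rewrite author's own statement) =====
-- stated objective: alternative
-- what changed: Replaces A's slice-based traversals (stride-jumping while loop with two slices per block, and N+M full strided-slice passes for round-robin) by a single enumerate-style pass with a modular counter that routes each element to taken/skipped (in_order) or into N+M residue buckets concatenated afterwards (round-robin).
import Mathlib
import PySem

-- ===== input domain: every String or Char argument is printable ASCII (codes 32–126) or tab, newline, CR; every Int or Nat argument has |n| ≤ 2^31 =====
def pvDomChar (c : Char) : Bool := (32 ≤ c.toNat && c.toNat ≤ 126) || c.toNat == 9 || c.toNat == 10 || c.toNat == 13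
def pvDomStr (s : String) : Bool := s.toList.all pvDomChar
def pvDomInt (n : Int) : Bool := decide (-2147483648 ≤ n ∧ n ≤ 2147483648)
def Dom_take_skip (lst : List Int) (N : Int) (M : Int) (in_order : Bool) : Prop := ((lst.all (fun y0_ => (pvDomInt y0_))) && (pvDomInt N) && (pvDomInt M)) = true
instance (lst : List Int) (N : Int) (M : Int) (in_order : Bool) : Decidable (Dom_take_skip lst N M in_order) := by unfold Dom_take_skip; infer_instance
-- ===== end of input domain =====

-- B replaces A's slice-based traversals by one modular-counter pass (with residue buckets
-- for the round-robin branch); same results, a different decomposition (no speed claim).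

-- ===== PORT A =====
-- A's in_order while loop: index jumps by N then by M, extending taken/skipped with the
-- two slices lst[index:index+N] and lst[index:index+M].  n = N.toNat, m = M.toNat;
-- the guard in take_skip supplies 0 < n, which makes the loop terminate.
def aLoop (xs : List Int) (n m : Nat) (hn : 0 < n) (index : Nat) (t s : List Int) :
    List Int × List Int :=
  if index < xs.length then
    aLoop xs n m hn (index + n + m)
      (t ++ PySem.List.slice xs (some (index : Int)) (some ((index : Int) + (n : Int))))
      (s ++ PySem.List.slice xs (some ((index : Int) + (n : Int)))
        (some ((index : Int) + (n : Int) + (m : Int))))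
  else (t, s)
termination_by xs.length - index
decreasing_by omega

def take_skip (lst : List Int) (N : Int) (M : Int) (in_order : Bool) : List Int × List Int :=
  if h : N ≤ 0 ∨ M < 0 then ([], [])  -- Python raises ValueError here; excluded by Pre_
  else if in_order then
    aLoop lst N.toNat M.toNat (by omega) 0 [] []
  else
    -- for i in range(N): taken.extend(lst[i::N+M]); for j in range(M): skipped.extend(lst[N+j::N+M])
    ((PySem.List.pyRange 0 N 1).foldl
        (fun acc i => acc ++ (PySem.List.slice? lst (some i) none (N + M)).getD []) [],
     (PySem.List.pyRange 0 M 1).foldl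
        (fun acc j => acc ++ (PySem.List.slice? lst (some (N + j)) none (N + M)).getD []) [])

-- ===== PORT B =====
-- single pass, r = running index mod K; route by r < N
def bLoopIn (n k : Nat) : List Int → Nat → List Int × List Int → List Int × List Int
  | [], _, acc => acc
  | x :: t, r, (tk, sk) =>
      bLoopIn n k t ((r + 1) % k) (if r < n then (tk ++ [x], sk) else (tk, sk ++ [x]))

-- single pass filling residue buckets; buckets[r].append(x)
def bRR (k : Nat) : List Int → Nat → List (List Int) → List (List Int)
  | [], _, b => b
  | x :: t, r, b => bRR k t ((r + 1) % k) (b.set r (b.getD r [] ++ [x]))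

def take_skip_alt (lst : List Int) (N : Int) (M : Int) (in_order : Bool) : List Int × List Int :=
  if N ≤ 0 ∨ M < 0 then ([], [])  -- same ValueError; excluded by Pre_
  else
    let k := (N + M).toNat
    if in_order then bLoopIn N.toNat k lst 0 ([], [])
    else
      let b := bRR k lst 0 (List.replicate k [])
      ((b.take N.toNat).flatten, (b.drop N.toNat).flatten)

-- ===== PRECONDITION & SPEC =====
-- Pre_ excludes exactly the inputs where Python A raises ValueError (N ≤ 0 or M < 0).
def Pre_take_skip (lst : List Int) (N : Int) (M : Int) (in_order : Bool) : Prop :=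
  0 < N ∧ 0 ≤ M
instance (lst : List Int) (N : Int) (M : Int) (in_order : Bool) :
    Decidable (Pre_take_skip lst N M in_order) := by unfold Pre_take_skip; infer_instance

def pvWitness_take_skip : List Int × Int × Int × Bool := ([1, 2, 3, 4, 5], 2, 1, false)

def Spec_take_skip (lst : List Int) (N : Int) (M : Int) (in_order : Bool)
    (out : List Int × List Int) : Prop := out = take_skip_alt lst N M in_order
instance (lst : List Int) (N : Int) (M : Int) (in_order : Bool) (out : List Int × List Int) :
    Decidable (Spec_take_skip lst N M in_order out) := by unfold Spec_take_skip; infer_instance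

-- ===== CLAIM (what is proved, stated in full; the proofs are below) =====
def Claim_equal_take_skip : Prop := ∀ (lst : List Int) (N : Int) (M : Int) (in_order : Bool),
  Dom_take_skip lst N M in_order → Pre_take_skip lst N M in_order →
  Spec_take_skip lst N M in_order (take_skip lst N M in_order)

-- ===== LEMMAS AND PROOFS =====

-- common ground for the in_order branch: block recursion (take n to taken, next m to skipped)
def chunks (n m : Nat) (xs : List Int) : List Int × List Int :=
  if h : xs = [] ∨ n = 0 then ([], [])
  else
    let p := chunks n m ((xs.drop n).drop m)
    (xs.take n ++ p.1, (xs.drop n).take m ++ p.2)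
termination_by xs.length
decreasing_by
  simp only [List.length_drop]
  rcases xs with _ | ⟨y, ys⟩ <;> simp_all <;> omega

-- element-wise recursion behind bLoopIn
def hIn (n k : Nat) : List Int → Nat → List Int × List Int
  | [], _ => ([], [])
  | x :: t, r =>
      let p := hIn n k t ((r + 1) % k)
      if r < n then (x :: p.1, p.2) else (p.1, x :: p.2)

-- elements at positions 0, k, 2k, … of xs
def everyK (k : Nat) : List Int → List Int
  | [] => []
  | x :: t => x :: everyK k (t.drop (k - 1))
termination_by xs => xs.length
decreasing_by simp

theorem chunks_nil (n m : Nat) : chunks n m [] = ([], []) := by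
  rw [chunks]; simp

theorem chunks_cons (n m : Nat) (xs : List Int) (hx : xs ≠ []) (hn : n ≠ 0) :
    chunks n m xs =
      (xs.take n ++ (chunks n m ((xs.drop n).drop m)).1,
       (xs.drop n).take m ++ (chunks n m ((xs.drop n).drop m)).2) := by
  rw [chunks]; simp [hx, hn]

theorem aLoop_eq (xs : List Int) (n m : Nat) (hn : 0 < n) (index : Nat) (t s : List Int) :
    aLoop xs n m hn index t s =
      (t ++ (chunks n m (xs.drop index)).1, s ++ (chunks n m (xs.drop index)).2) := by
  fun_induction aLoop with
  | case1 index t s hlt ih =>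
    rw [ih]
    have hne : xs.drop index ≠ [] := by
      simp only [ne_eq, List.drop_eq_nil_iff]; omega
    have h2 : (index : Int) + (n : Int) = ((index + n : Nat) : Int) := by push_cast; ring
    rw [PySem.List.slice_natCast_add xs index n, h2, PySem.List.slice_natCast_add,
      chunks_cons n m _ hne (by omega)]
    simp [List.drop_drop, List.append_assoc]
  | case2 index t s hlt =>
    have : xs.drop index = [] := by
      simp only [List.drop_eq_nil_iff]; omega
    rw [this, chunks_nil]
    simp

theorem bLoopIn_eq (n k : Nat) (xs : List Int) (r : Nat) (t s : List Int) :
    bLoopIn n k xs r (t, s) = (t ++ (hIn n k xs r).1, s ++ (hIn n k xs r).2) := by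
  induction xs generalizing r t s with
  | nil => simp [bLoopIn, hIn]
  | cons x xs ih =>
    by_cases hrn : r < n <;> simp [bLoopIn, hIn, hrn, ih]

theorem hIn_all (n : Nat) (hn : 0 < n) (xs : List Int) :
    ∀ r, r < n → hIn n n xs r = (xs, []) := by
  induction xs with
  | nil => intro r hr; simp [hIn]
  | cons x t ih =>
    intro r hr
    simp only [hIn, if_pos hr]
    rw [ih ((r + 1) % n) (Nat.mod_lt _ hn)]

theorem chunks_m0 (n : Nat) (hn : n ≠ 0) (xs : List Int) : chunks n 0 xs = (xs, []) := by
  fun_induction chunks with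
  | case1 xs h =>
    rcases h with h | h
    · simp [h]
    · exact absurd h hn
  | case2 xs h ih ih1 =>
    simp only [List.drop_zero] at ih1
    simp [ih, ih1]

theorem hIn_L1 (n m : Nat) (hm : 0 < m) :
    ∀ (a : Nat), a ≤ n → ∀ xs : List Int,
      hIn n (n + m) xs (n - a) =
        (xs.take a ++ (hIn n (n + m) (xs.drop a) n).1, (hIn n (n + m) (xs.drop a) n).2) := by
  intro a
  induction a with
  | zero => intro _ xs; simp
  | succ a ih =>
    intro ha xs
    cases xs with
    | nil => simp [hIn]
    | cons x t =>
      have hr : n - (a + 1) < n := by omega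
      simp only [hIn, if_pos hr]
      have hmod : (n - (a + 1) + 1) % (n + m) = n - a := by
        rw [show n - (a + 1) + 1 = n - a by omega]
        exact Nat.mod_eq_of_lt (by omega)
      rw [hmod, ih (by omega)]
      simp

theorem hIn_L2 (n m : Nat) (hn : 0 < n) :
    ∀ (b : Nat), b < m → ∀ xs : List Int,
      hIn n (n + m) xs (n + m - (b + 1)) =
        ((hIn n (n + m) (xs.drop (b + 1)) 0).1,
         xs.take (b + 1) ++ (hIn n (n + m) (xs.drop (b + 1)) 0).2) := by
  intro b
  induction b with
  | zero =>
    intro _ xs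
    cases xs with
    | nil => simp [hIn]
    | cons x t =>
      have hr : ¬ (n + m - 1 < n) := by omega
      simp only [hIn, if_neg hr]
      rw [show n + m - 1 + 1 = n + m by omega, Nat.mod_self]
      simp
  | succ b ih =>
    intro hb xs
    cases xs with
    | nil => simp [hIn]
    | cons x t =>
      have hr : ¬ (n + m - (b + 2) < n) := by omega
      simp only [hIn, if_neg hr]
      have hmod : (n + m - (b + 2) + 1) % (n + m) = n + m - (b + 1) := by
        rw [show n + m - (b + 2) + 1 = n + m - (b + 1) by omega]
        exact Nat.mod_eq_of_lt (by omega)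
      rw [hmod, ih (by omega)]
      simp

theorem hIn_chunks (n m : Nat) (hn : 0 < n) (xs : List Int) :
    hIn n (n + m) xs 0 = chunks n m xs := by
  rcases Nat.eq_zero_or_pos m with hm | hm
  · subst hm
    rw [chunks_m0 n (by omega)]
    rw [Nat.add_zero]
    exact hIn_all n hn xs 0 hn
  · suffices H : ∀ (L : Nat) (xs : List Int), xs.length ≤ L →
        hIn n (n + m) xs 0 = chunks n m xs by
      exact H xs.length xs le_rfl
    intro L
    induction L with
    | zero =>
      intro xs hx
      have : xs = [] := by
        cases xs with
        | nil => rfl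
        | cons y ys => simp at hx
      subst this
      simp [hIn, chunks_nil]
    | succ L ih =>
      intro xs hx
      rcases eq_or_ne xs [] with rfl | hne
      · simp [hIn, chunks_nil]
      · have h1 := hIn_L1 n m hm n le_rfl xs
        rw [Nat.sub_self] at h1
        rw [h1]
        have h2 := hIn_L2 n m hn (m - 1) (by omega) (xs.drop n)
        rw [show m - 1 + 1 = m by omega, show n + m - m = n by omega] at h2
        rw [h2]
        have hlen : ((xs.drop n).drop m).length ≤ L := by
          have : xs.length ≥ 1 := by
            cases xs with
            | nil => simp at hne
            | cons y ys => simp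
          simp only [List.length_drop]
          omega
        rw [ih _ hlen, chunks_cons n m xs hne (by omega)]

theorem sliceCore (k : Nat) (hk : 0 < k) :
    ∀ (fuel : Nat) (xs : List Int) (s : Nat), xs.length - s ≤ fuel →
    List.filterMap (fun j : Nat => xs[((s : Int) + (k : Int) * (j : Int)).toNat]?)
      (List.range (if (s : Int) < (xs.length : Int) then
        (((xs.length : Int) - (s : Int) + (k : Int) - 1) / (k : Int)).toNat else 0))
    = everyK k (xs.drop s) := by
  intro fuel
  induction fuel with
  | zero =>
    intro xs s hf
    have hle : xs.length ≤ s := by omega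
    rw [if_neg (by exact_mod_cast not_lt.mpr hle), List.drop_eq_nil_of_le hle]
    simp [everyK]
  | succ fuel ih =>
    intro xs s hf
    by_cases hs : s < xs.length
    · have hkz : (k : Int) ≠ 0 := by positivity
      have hcount : (((xs.length : Int) - s + k - 1) / k).toNat
          = (((xs.length : Int) - s - 1) / k).toNat + 1 := by
        have h1 : ((xs.length : Int) - s + k - 1) = ((xs.length : Int) - s - 1) + 1 * k := by ring
        have h2 : 0 ≤ ((xs.length : Int) - s - 1) / k :=
          Int.ediv_nonneg (by push_cast; omega) (by positivity)
        rw [h1, Int.add_mul_ediv_right _ _ hkz]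
        omega
      rw [if_pos (by exact_mod_cast hs), hcount, List.range_succ_eq_map]
      rw [List.filterMap_cons, List.filterMap_map]
      have hf0 : ((s : Int) + (k : Int) * ((0 : Nat) : Int)).toNat = s := by push_cast; omega
      simp only [hf0]
      rw [List.getElem?_eq_getElem hs]
      have hfun : ((fun j : Nat => xs[((s : Int) + (k : Int) * (j : Int)).toNat]?) ∘ Nat.succ)
          = (fun j : Nat => xs[(((s + k : Nat) : Int) + (k : Int) * (j : Int)).toNat]?) := by
        funext j
        simp only [Function.comp]
        congr 1
        push_cast
        ring_nf
      have hcnt2 : (((xs.length : Int) - s - 1) / k).toNat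
          = (if ((s + k : Nat) : Int) < (xs.length : Int) then
              (((xs.length : Int) - ((s + k : Nat) : Int) + (k : Int) - 1) / (k : Int)).toNat else 0) := by
        by_cases h2 : ((s + k : Nat) : Int) < (xs.length : Int)
        · rw [if_pos h2]
          congr 2
          push_cast
          ring
        · rw [if_neg h2]
          have hlt : (xs.length : Int) - s - 1 < k := by push_cast at h2 ⊢; omega
          rw [Int.ediv_eq_zero_of_lt (by push_cast; omega) hlt]
          rfl
      rw [hfun, hcnt2, ih xs (s + k) (by simp; omega)]
      rw [List.drop_eq_getElem_cons hs]
      rw [everyK]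
      rw [List.drop_drop, show s + 1 + (k - 1) = s + k by omega]
    · have hle : xs.length ≤ s := by omega
      rw [if_neg (by exact_mod_cast not_lt.mpr hle), List.drop_eq_nil_of_le hle]
      simp [everyK]

theorem strided (xs : List Int) (i k : Nat) (hk : 0 < k) :
    PySem.List.slice? xs (some (i : Int)) none (k : Int) = some (everyK k (xs.drop i)) := by
  simp only [PySem.List.slice?, PySem.List.sliceIndices]
  have hknn : ¬ ((k : Int) < 0) := not_lt.mpr (by positivity)
  have hinn : ¬ ((i : Int) < 0) := not_lt.mpr (by positivity)
  have hkp : (0 : Int) < (k : Int) := by exact_mod_cast hk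
  rw [if_neg (by exact_mod_cast hk.ne')]
  simp only [if_neg hknn, if_neg hinn, if_pos hkp]
  have hdrop : xs.drop i = xs.drop (min i xs.length) := by
    rcases le_total i xs.length with h | h
    · rw [min_eq_left h]
    · rw [min_eq_right h, List.drop_eq_nil_of_le h, List.drop_eq_nil_of_le le_rfl]
  rw [hdrop, ← sliceCore k hk xs.length xs (min i xs.length) (by omega), ← Nat.cast_min]

theorem bRR_getD (k : Nat) (hk : 0 < k) (xs : List Int) (r : Nat) (b : List (List Int))
    (hr : r < k) (hb : b.length = k) (j : Nat) (hj : j < k) :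
    (bRR k xs r b).getD j [] =
      b.getD j [] ++ everyK k (xs.drop (if r ≤ j then j - r else j + k - r)) := by
  induction xs generalizing r b with
  | nil => simp [bRR, everyK]
  | cons x t ih =>
    have hmod : (r + 1) % k = if r + 1 = k then 0 else r + 1 := by
      rcases eq_or_ne (r + 1) k with h | h
      · simp [h, Nat.mod_self]
      · rw [if_neg h]; exact Nat.mod_eq_of_lt (by omega)
    rw [bRR, ih ((r + 1) % k) _ (Nat.mod_lt _ (by omega)) (by simp [hb])]
    rcases eq_or_ne j r with rfl | hjr
    · have hset : (b.set j (b.getD j [] ++ [x])).getD j [] = b.getD j [] ++ [x] := by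
        simp [List.getD, List.getElem?_set, hb, hj]
      rw [hset]
      have harg : (if (j + 1) % k ≤ j then j - (j + 1) % k else j + k - (j + 1) % k) = k - 1 := by
        rw [hmod]; split_ifs <;> omega
      rw [harg, if_pos le_rfl, Nat.sub_self, List.drop_zero, everyK]
      simp
    · have hset : (b.set r (b.getD r [] ++ [x])).getD j [] = b.getD j [] := by
        simp [List.getD, List.getElem?_set, hjr.symm]
      rw [hset]
      have hD1 : 1 ≤ (if r ≤ j then j - r else j + k - r) := by split_ifs <;> omega
      have harg : (if (r + 1) % k ≤ j then j - (r + 1) % k else j + k - (r + 1) % k)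
          = (if r ≤ j then j - r else j + k - r) - 1 := by
        rw [hmod]; split_ifs <;> omega
      rw [harg]
      conv_rhs => rw [show (if r ≤ j then j - r else j + k - r)
            = (if r ≤ j then j - r else j + k - r) - 1 + 1 by omega]
      rw [List.drop_succ_cons]

theorem bRR_length (k : Nat) (xs : List Int) (r : Nat) (b : List (List Int)) :
    (bRR k xs r b).length = b.length := by
  induction xs generalizing r b with
  | nil => simp [bRR]
  | cons x xs ih => simp [bRR, ih]

theorem flat_take (b : List (List Int)) (n : Nat) :
    (b.take n).flatten = (List.range (min n b.length)).flatMap (fun j => b.getD j []) := by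
  induction b generalizing n with
  | nil => simp
  | cons x bs ih =>
    cases n with
    | zero => simp
    | succ n =>
      have : min (n + 1) (x :: bs).length = min n bs.length + 1 := by
        simp [List.length_cons]
      rw [this, List.range_succ_eq_map]
      simp [List.flatMap_cons, List.flatMap_map, ih]

theorem flat_drop (b : List (List Int)) (n : Nat) :
    (b.drop n).flatten = (List.range (b.length - n)).flatMap (fun j => b.getD (n + j) []) := by
  induction b generalizing n with
  | nil => simp
  | cons x bs ih =>
    cases n with
    | zero =>
      rw [List.drop_zero, List.length_cons, Nat.sub_zero, List.range_succ_eq_map]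
      have h0 := ih 0
      simp at h0
      simp [List.flatMap_cons, List.flatMap_map, h0]
    | succ n =>
      have hsh : ∀ j : Nat, ((x :: bs)[n + 1 + j]?).getD [] = (bs[n + j]?).getD [] := by
        intro j; rw [show n + 1 + j = (n + j) + 1 by omega]; simp
      simp [List.drop_succ_cons, ih, List.getD]
      simp [hsh]

-- ===== VERDICT (by name: the statement is the Claim_ definition above) =====
theorem take_skip_spec : Claim_equal_take_skip := by
  intro lst N M in_order _hDom hPre
  obtain ⟨hN, hM⟩ := hPre
  unfold Spec_take_skip take_skip take_skip_alt
  rw [dif_neg (show ¬ (N ≤ 0 ∨ M < 0) by omega),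
      if_neg (show ¬ (N ≤ 0 ∨ M < 0) by omega)]
  have hk : (N + M).toNat = N.toNat + M.toNat := by omega
  have hn : 0 < N.toNat := by omega
  cases in_order with
  | true =>
    simp only [hk]
    rw [aLoop_eq, bLoopIn_eq, hIn_chunks _ _ hn]
    simp
  | false =>
    simp only [Bool.false_eq_true, if_neg (show ¬ False by exact id), hk]
    rw [PySem.List.foldl_append_eq_flatMap, PySem.List.foldl_append_eq_flatMap]
    rw [PySem.List.pyRange_one, PySem.List.pyRange_one]
    rw [List.flatMap_map, List.flatMap_map]
    have hNM : N + M = ((N.toNat + M.toNat : Nat) : Int) := by omega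
    have hbucket : ∀ j : Nat, j < N.toNat + M.toNat →
        (bRR (N.toNat + M.toNat) lst 0 (List.replicate (N.toNat + M.toNat) [])).getD j []
          = everyK (N.toNat + M.toNat) (lst.drop j) := by
      intro j hj
      rw [bRR_getD _ (by omega) _ _ _ (by omega) (by simp) j hj,
        List.getD_replicate _ hj, if_pos (Nat.zero_le j), Nat.sub_zero]
      simp
    rw [flat_take, flat_drop, bRR_length, List.length_replicate]
    rw [show min N.toNat (N.toNat + M.toNat) = N.toNat by omega,
        show N.toNat + M.toNat - N.toNat = M.toNat by omega]
    refine congrArg₂ Prod.mk ?_ ?_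
    · -- taken
      rw [show (N - 0).toNat = N.toNat by omega]
      simp only [List.nil_append]
      apply List.flatMap_congr
      intro j hj
      rw [List.mem_range] at hj
      rw [zero_add, hNM, strided lst j (N.toNat + M.toNat) (by omega)]
      rw [hbucket j (by omega)]
      rfl
    · -- skipped
      rw [show (M - 0).toNat = M.toNat by omega]
      simp only [List.nil_append]
      apply List.flatMap_congr
      intro j hj
      rw [List.mem_range] at hj
      rw [zero_add, hNM,
        show N + (j : Int) = ((N.toNat + j : Nat) : Int) by omega,
        strided lst (N.toNat + j) (N.toNat + M.toNat) (by omega)]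
      rw [hbucket (N.toNat + j) (by omega)]
      rfl
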